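-- pv_equiv track=rewrite | github.com/imtobiasmart/airtable_slides_update | main.py | add_spaces_after_commas_between_people
-- ===== SOURCE A (Python) =====
-- def add_spaces_after_commas_between_people(s: str) -> str:
--     result = ''
--     paren_depth = 0
--     i = 0
--     while i < len(s):
--         c = s[i]
--         if c == '(':
--             paren_depth += 1
--             result += c
--             i += 1
--         elif c == ')':
--             if paren_depth > 0:
--                 paren_depth -= 1
--             result += c
--             i += 1
--         elif c == ',' and paren_depth == 0:
--             result += ', '
--             i += 1
--             while i < len(s) and s[i] == ' ':
--                 i += 1
--         else:
--             result += c
--             i += 1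
--     return result
-- ===== SOURCE B (Python) =====
-- def split_top_level(s: str) -> list:
--     """Split s at the first comma lying outside parentheses (depth clamped at 0),
--     recursing on the remainder; returns the list of top-level segments."""
--     depth = 0
--     for i, c in enumerate(s):
--         if c == ',' and depth == 0:
--             return [s[:i]] + split_top_level(s[i + 1:])
--         if c == '(':
--             depth += 1
--         elif c == ')' and depth > 0:
--             depth -= 1
--     return [s]
--
--
-- def add_spaces_after_commas_between_people(s: str) -> str:
--     parts = split_top_level(s)
--     out = parts[0]
--     for p in parts[1:]:
--         out += ', ' + p.lstrip(' ')
--     return out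
-- ===== Notes on version B (the rewrite author's own statement) =====
-- stated objective: faster
-- what changed: Replaces A's character-emitting state machine (appending to the result one character at a time, with a nested space-skipping inner loop) by a recursive split of the string at top-level commas followed by joining whole segments with a comma-space separator, stripping leading spaces from each later segment.
import Mathlib
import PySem

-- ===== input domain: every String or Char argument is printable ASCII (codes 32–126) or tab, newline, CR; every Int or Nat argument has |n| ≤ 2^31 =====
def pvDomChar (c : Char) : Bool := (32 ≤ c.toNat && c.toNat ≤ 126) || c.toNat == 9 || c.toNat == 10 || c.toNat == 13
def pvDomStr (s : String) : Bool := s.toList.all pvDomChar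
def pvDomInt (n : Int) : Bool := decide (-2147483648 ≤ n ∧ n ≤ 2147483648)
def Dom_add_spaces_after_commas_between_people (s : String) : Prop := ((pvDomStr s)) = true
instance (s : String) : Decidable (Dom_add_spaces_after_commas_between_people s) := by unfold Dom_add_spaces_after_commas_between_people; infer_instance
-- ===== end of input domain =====

-- B replaces A's character-emitting state machine (with its nested space-skipping
-- inner loop) by a recursive split at top-level commas followed by a join with
-- ', ' and lstrip(' ') on each later segment; same cost, different decomposition.

-- ===== PORT A =====

-- inner «while i < len(s) and s[i] == ' ': i += 1» — skips the leading run of spaces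
def skipSpacesA : List Char → List Char
  | [] => []
  | c :: r => if c = ' ' then skipSpacesA r else c :: r

theorem skipSpacesA_length_le (l : List Char) : (skipSpacesA l).length ≤ l.length := by
  induction l with
  | nil => simp [skipSpacesA]
  | cons c r ih =>
    simp only [skipSpacesA]; split
    · exact le_trans ih (by simp)
    · simp

-- the while loop of A: state = (remaining input, paren_depth, result)
def goA : List Char → Nat → List Char → List Char
  | [], _, acc => acc
  | c :: rest, d, acc =>
    if c = '(' then goA rest (d + 1) (acc ++ [c])
    else if c = ')' then goA rest (if d > 0 then d - 1 else d) (acc ++ [c])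
    else if c = ',' ∧ d = 0 then goA (skipSpacesA rest) d (acc ++ [',', ' '])
    else goA rest d (acc ++ [c])
termination_by l _ _ => l.length
decreasing_by
  all_goals first
    | (simp; done)
    | (have := skipSpacesA_length_le rest; simp; omega)

def add_spaces_after_commas_between_people (s : String) : String :=
  String.mk (goA s.toList 0 [])

-- ===== PORT B =====

-- the enumerate loop of split_top_level: index of the first comma outside parens
def findCommaB : List Char → Nat → Option Nat
  | [], _ => none
  | c :: r, d =>
    if c = ',' ∧ d = 0 then some 0
    else (findCommaB r (if c = '(' then d + 1 else if c = ')' ∧ d > 0 then d - 1 else d)).map (· + 1)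

theorem findCommaB_ne_nil {l : List Char} {d i : Nat} (h : findCommaB l d = some i) : l ≠ [] := by
  intro he; subst he; simp [findCommaB] at h

-- split_top_level; s[:i] / s[i+1:] with 0 ≤ i < len(s) are exactly take i / drop (i+1)
def splitTopB (l : List Char) : List (List Char) :=
  match h : findCommaB l 0 with
  | none => [l]
  | some i => l.take i :: splitTopB (l.drop (i + 1))
termination_by l.length
decreasing_by
  have hne := findCommaB_ne_nil h
  cases l with
  | nil => exact absurd rfl hne
  | cons c r => simp [List.length_drop]

-- p.lstrip(' ') = dropWhile (· = ' ')
def add_spaces_after_commas_between_people_alt (s : String) : String :=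
  match splitTopB s.toList with
  | [] => String.mk []   -- unreachable: splitTopB never returns []
  | h :: t =>
    String.mk (t.foldl (fun acc p => acc ++ (',' :: ' ' :: p.dropWhile (· = ' '))) h)

-- ===== PRECONDITION & SPEC =====
def Spec_add_spaces_after_commas_between_people (s : String) (out : String) : Prop := out = add_spaces_after_commas_between_people_alt s
instance (s : String) (out : String) : Decidable (Spec_add_spaces_after_commas_between_people s out) := by unfold Spec_add_spaces_after_commas_between_people; infer_instance

-- ===== CLAIM (what is proved, stated in full; the proofs are below) =====
def Claim_equal_add_spaces_after_commas_between_people : Prop := ∀ (s : String), Dom_add_spaces_after_commas_between_people s → Spec_add_spaces_after_commas_between_people s (add_spaces_after_commas_between_people s)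

-- ===== LEMMAS AND PROOFS =====

-- joint specification: the recursion both programs are reduced to
def fSpec : List Char → Nat → List Char
  | [], _ => []
  | c :: r, d =>
    if c = ',' ∧ d = 0 then ',' :: ' ' :: fSpec (r.dropWhile (· = ' ')) 0
    else c :: fSpec r (if c = '(' then d + 1 else if c = ')' ∧ d > 0 then d - 1 else d)
termination_by l _ => l.length
decreasing_by
  all_goals first
    | (simp; done)
    | (have := r.length_dropWhile_le (· = ' '); simp; omega)

def joinTail (ps : List (List Char)) : List Char :=
  ps.flatMap (fun p => ',' :: ' ' :: p.dropWhile (· = ' '))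

def renderB : List (List Char) → List Char
  | [] => []
  | h :: t => h ++ joinTail t

def strippedRender : List (List Char) → List Char
  | [] => []
  | h :: t => h.dropWhile (· = ' ') ++ joinTail t

theorem skipSpacesA_eq_dropWhile (l : List Char) :
    skipSpacesA l = l.dropWhile (· = ' ') := by
  induction l with
  | nil => rfl
  | cons c r ih => simp only [skipSpacesA, List.dropWhile_cons]; split <;> simp_all

theorem splitTopB_none {l : List Char} (h : findCommaB l 0 = none) : splitTopB l = [l] := by
  rw [splitTopB]; split
  · rfl
  · rename_i i hi; rw [h] at hi; cases hi

theorem splitTopB_some {l : List Char} {i : Nat} (h : findCommaB l 0 = some i) :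
    splitTopB l = l.take i :: splitTopB (l.drop (i + 1)) := by
  rw [splitTopB]; split
  · rename_i hn; rw [h] at hn; cases hn
  · rename_i j hj; rw [h] at hj; injection hj with e; subst e; rfl

theorem splitTopB_ne_nil (l : List Char) : splitTopB l ≠ [] := by
  rcases h : findCommaB l 0 with _ | i
  · rw [splitTopB_none h]; simp
  · rw [splitTopB_some h]; simp

theorem goA_eq (n : Nat) : ∀ l : List Char, l.length ≤ n → ∀ (d : Nat) (acc : List Char),
    goA l d acc = acc ++ fSpec l d := by
  induction n with
  | zero =>
    intro l hl d acc
    have : l = [] := List.eq_nil_of_length_eq_zero (by omega)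
    subst this; simp [goA, fSpec]
  | succ n ih =>
    intro l hl d acc
    cases l with
    | nil => simp [goA, fSpec]
    | cons c r =>
      have hr : r.length ≤ n := by simpa using hl
      have ih1 : ∀ (d : Nat) (acc : List Char), goA r d acc = acc ++ fSpec r d :=
        fun d acc => ih r hr d acc
      have ih2 : ∀ (d : Nat) (acc : List Char),
          goA (r.dropWhile (· = ' ')) d acc = acc ++ fSpec (r.dropWhile (· = ' ')) d := by
        rw [← skipSpacesA_eq_dropWhile]
        exact fun d acc => ih (skipSpacesA r) (le_trans (skipSpacesA_length_le r) hr) d acc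
      simp only [goA, fSpec, skipSpacesA_eq_dropWhile, ih1, ih2]
      split_ifs <;> simp_all

theorem fSpec_none : ∀ (l : List Char) (d : Nat), findCommaB l d = none → fSpec l d = l := by
  intro l
  induction l with
  | nil => intro d _; simp [fSpec]
  | cons c r ih =>
    intro d h
    simp only [findCommaB] at h
    by_cases h3 : c = ',' ∧ d = 0
    · simp [h3] at h
    · simp only [h3, if_false, Option.map_eq_none_iff] at h
      simp only [fSpec, h3, if_false]
      rw [ih _ h]

theorem fSpec_some : ∀ (l : List Char) (d i : Nat), findCommaB l d = some i →
    fSpec l d = l.take i ++ ',' :: ' ' :: fSpec ((l.drop (i + 1)).dropWhile (· = ' ')) 0 := by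
  intro l
  induction l with
  | nil => intro d i h; simp [findCommaB] at h
  | cons c r ih =>
    intro d i h
    by_cases h3 : c = ',' ∧ d = 0
    · obtain ⟨hc, hd⟩ := h3
      subst hc; subst hd
      simp [findCommaB] at h
      subst h
      simp [fSpec]
    · simp only [findCommaB, h3, if_false, Option.map_eq_some_iff] at h
      obtain ⟨j, hj, hij⟩ := h
      subst hij
      simp only [fSpec, h3, if_false]
      rw [ih _ _ hj]
      simp

theorem findCommaB_space (l : List Char) :
    findCommaB (' ' :: l) 0 = (findCommaB l 0).map (· + 1) := by
  simp [findCommaB]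

theorem splitTopB_space (l : List Char) :
    splitTopB (' ' :: l) = (splitTopB l).modifyHead (fun h => ' ' :: h) := by
  rcases h : findCommaB l 0 with _ | i
  · have h' : findCommaB (' ' :: l) 0 = none := by rw [findCommaB_space, h]; rfl
    rw [splitTopB_none h', splitTopB_none h]; simp
  · have h' : findCommaB (' ' :: l) 0 = some (i + 1) := by rw [findCommaB_space, h]; rfl
    rw [splitTopB_some h', splitTopB_some h]; simp

theorem main_pair (n : Nat) : ∀ l : List Char, l.length ≤ n →
    fSpec l 0 = renderB (splitTopB l) ∧
      fSpec (l.dropWhile (· = ' ')) 0 = strippedRender (splitTopB l) := by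
  induction n with
  | zero =>
    intro l hl
    have : l = [] := List.eq_nil_of_length_eq_zero (by omega)
    subst this
    rw [splitTopB_none (by rfl)]
    constructor <;> simp [fSpec, renderB, strippedRender, joinTail]
  | succ n ih =>
    intro l hl
    have hM : fSpec l 0 = renderB (splitTopB l) := by
      rcases h : findCommaB l 0 with _ | i
      · rw [fSpec_none l 0 h, splitTopB_none h]
        simp [renderB, joinTail]
      · have hne := findCommaB_ne_nil h
        have hlen : (l.drop (i + 1)).length ≤ n := by
          cases l with
          | nil => exact absurd rfl hne
          | cons c r => simp at hl ⊢; omega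
        rw [fSpec_some l 0 i h, splitTopB_some h]
        have hIH := (ih _ hlen).2
        rcases hsp : splitTopB (l.drop (i + 1)) with _ | ⟨sh, st⟩
        · exact absurd hsp (splitTopB_ne_nil _)
        · rw [hsp] at hIH
          simp only [renderB]
          rw [hIH]
          simp [strippedRender, joinTail]
    refine ⟨hM, ?_⟩
    cases l with
    | nil =>
      rw [splitTopB_none (by rfl)]
      simp [fSpec, strippedRender, joinTail]
    | cons c r =>
      by_cases hc : c = ' '
      · subst hc
        rw [splitTopB_space]
        rcases hsp : splitTopB r with _ | ⟨sh, st⟩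
        · exact absurd hsp (splitTopB_ne_nil _)
        · have hr := (ih r (by simpa using hl)).2
          rw [hsp] at hr
          simp only [strippedRender] at hr
          simp only [List.modifyHead, strippedRender, List.dropWhile_cons]
          simpa using hr
      · have hdw : (c :: r).dropWhile (· = ' ') = c :: r := by
          simp [hc]
        rw [hdw, hM]
        rcases h : findCommaB (c :: r) 0 with _ | i
        · rw [splitTopB_none h]
          simp [renderB, strippedRender, hc]
        · rw [splitTopB_some h]
          simp only [renderB, strippedRender]
          have hsh : (List.take i (c :: r)).dropWhile (· = ' ') = List.take i (c :: r) := by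
            cases i with
            | zero => simp
            | succ j => simp [List.take_succ_cons, hc]
          rw [hsh]

theorem foldl_render (t : List (List Char)) (h : List Char) :
    t.foldl (fun acc p => acc ++ (',' :: ' ' :: p.dropWhile (· = ' '))) h = h ++ joinTail t :=
  PySem.List.foldl_append_eq_flatMap _ _ _

-- ===== VERDICT (by name: the statement is the Claim_ definition above) =====
theorem add_spaces_after_commas_between_people_spec : Claim_equal_add_spaces_after_commas_between_people := by
  intro s _
  unfold Spec_add_spaces_after_commas_between_people
  unfold add_spaces_after_commas_between_people add_spaces_after_commas_between_people_alt
  rw [goA_eq s.toList.length s.toList le_rfl 0 []]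
  rw [List.nil_append, (main_pair s.toList.length s.toList le_rfl).1]
  rcases hsp : splitTopB s.toList with _ | ⟨h, t⟩
  · exact absurd hsp (splitTopB_ne_nil _)
  · exact congrArg String.mk (foldl_render t h).symm
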